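-- pv_equiv track=rewrite | github.com/SevvalEnsarioglu/algoritmalar | brute-force/calisma-1.py | deneme2
-- ===== SOURCE A (Python) =====
-- def deneme2(A):
--     c=0
--     c1=0
--     for i in range(len(A)):
--         if(A[i]==1):
--             c1+=1
--         if(A[i]==9):
--             c+=c1
--     return c
-- ===== SOURCE B (Python) =====
-- def deneme2(A):
--     return sum(A[:i].count(1) for i in range(len(A)) if A[i] == 9)
-- ===== Notes on version B (the rewrite author's own statement) =====
-- stated objective: alternative
-- what changed: Replaces the running 1-counter maintained across one pass by a brute-force recomputation: for each index holding a 9, count the 1s in the prefix A[:i] and sum those counts.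
import Mathlib
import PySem

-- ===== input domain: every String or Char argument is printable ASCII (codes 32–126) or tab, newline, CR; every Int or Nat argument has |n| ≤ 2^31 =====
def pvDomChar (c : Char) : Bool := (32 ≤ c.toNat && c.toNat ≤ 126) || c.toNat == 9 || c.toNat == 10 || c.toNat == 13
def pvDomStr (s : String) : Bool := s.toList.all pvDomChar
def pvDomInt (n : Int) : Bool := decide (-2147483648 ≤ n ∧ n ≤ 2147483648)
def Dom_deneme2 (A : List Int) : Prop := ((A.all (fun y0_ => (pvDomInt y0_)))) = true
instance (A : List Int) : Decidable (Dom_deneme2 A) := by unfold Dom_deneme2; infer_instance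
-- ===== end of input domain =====

-- B recomputes the 1-count of the prefix A[:i] at every 9 instead of maintaining A's running counter; objective: alternative decomposition.

-- ===== PORT A =====
-- single pass keeping (c, c1): c1 counts 1s seen so far, c accumulates c1 at each 9
def deneme2 (A : List Int) : Int :=
  (A.foldl (fun (s : Int × Int) x =>
      let c1 := if x == 1 then s.2 + 1 else s.2
      let c := if x == 9 then s.1 + c1 else s.1
      (c, c1)) (0, 0)).1

-- ===== PORT B =====
-- sum(A[:i].count(1) for i in range(len(A)) if A[i] == 9)
def deneme2_alt (A : List Int) : Int :=
  ((List.range A.length).map (fun i =>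
      if A.getD i 0 == 9 then ((A.take i).count 1 : Int) else 0)).sum

-- ===== PRECONDITION & SPEC =====
def Spec_deneme2 (A : List Int) (out : Int) : Prop := out = deneme2_alt A
instance (A : List Int) (out : Int) : Decidable (Spec_deneme2 A out) := by unfold Spec_deneme2; infer_instance

-- ===== CLAIM (what is proved, stated in full; the proofs are below) =====
def Claim_equal_deneme2 : Prop := ∀ (A : List Int), Dom_deneme2 A → Spec_deneme2 A (deneme2 A)

-- ===== LEMMAS AND PROOFS =====

-- common reference: for each element, bump the counter at 1, add the (updated) counter at 9
def pvT : List Int → Int → Int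
  | [], _ => 0
  | x :: xs, k =>
      let k' := k + (if x == 1 then 1 else 0)
      (if x == 9 then k' else 0) + pvT xs k'

theorem pvA_foldl (l : List Int) (c c1 : Int) :
    (l.foldl (fun (s : Int × Int) x =>
      let c1 := if x == 1 then s.2 + 1 else s.2
      let c := if x == 9 then s.1 + c1 else s.1
      (c, c1)) (c, c1)).1 = c + pvT l c1 := by
  induction l generalizing c c1 with
  | nil => simp [pvT]
  | cons x xs ih =>
      simp only [List.foldl_cons, pvT]
      rw [ih]
      by_cases h1 : x == 1 <;> by_cases h9 : x == 9 <;> simp [h1, h9] <;> ring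

theorem pvB_sum (l : List Int) (p : List Int) :
    ((List.range l.length).map (fun i =>
        if l.getD i 0 == 9 then (((p ++ l.take i).count 1 : Nat) : Int) else 0)).sum
      = pvT l ((p.count 1 : Nat) : Int) := by
  induction l generalizing p with
  | nil => simp [pvT]
  | cons x xs ih =>
      rw [List.length_cons, List.range_succ_eq_map]
      simp only [List.map_cons, List.map_map, List.sum_cons, Function.comp_def,
        List.getD_cons_succ, List.take_succ_cons, List.getD_cons_zero, List.take_zero,
        List.append_nil]
      have hp : ∀ i : Nat, p ++ x :: xs.take i = (p ++ [x]) ++ xs.take i := by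
        intro i; simp
      have := ih (p ++ [x])
      simp only [hp]
      rw [this]
      have hc : ((p ++ [x]).count 1 : Nat) = p.count 1 + (if x == 1 then 1 else 0) := by
        simp [List.count_append, List.count_singleton]
      rw [hc]
      by_cases h1 : x == 1
      · have hx : x = 1 := by simpa using h1
        subst hx
        simp only [pvT]
        push_cast
        simp
        try ring
      · by_cases h9 : x == 9
        · have hx : x = 9 := by simpa using h9
          subst hx
          simp only [pvT]
          push_cast
          simp
          try ring
        · simp only [pvT, h1, h9]
          push_cast
          simp
          try ring

-- ===== VERDICT (by name: the statement is the Claim_ definition above) =====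
theorem deneme2_spec : Claim_equal_deneme2 := by
  intro A _
  unfold Spec_deneme2 deneme2 deneme2_alt
  rw [pvA_foldl]
  have := pvB_sum A []
  simpa using this.symm
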